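-- pv_equiv track=rewrite | github.com/sun-hainan/Python | 编码理论/bch_code.py | _polynomial_divide
-- ===== SOURCE A (Python) =====
-- from typing import List, Tuple, Optional
--
-- def _polynomial_divide(dividend: List[int], divisor: List[int]) -> List[int]:
--
--     """
--
--     多项式除法
--
--
--
--     Args:
--
--         dividend: 被除多项式系数
--
--         divisor: 除多项式系数
--
--
--
--     Returns:
--
--         余式
--
--     """
--
--     dividend = dividend.copy()
--
--     divisor_degree = len(divisor) - 1
--
--
--
--     for i in range(len(dividend) - divisor_degree):
--
--         if dividend[i]:
--
--             for j in range(1, len(divisor)):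
--
--                 dividend[i + j] ^= divisor[j]
--
--
--
--     # 返回余式(最后 divisor_degree 位)
--
--     return dividend[len(dividend) - divisor_degree:]
-- ===== SOURCE B (Python) =====
-- def _polynomial_divide(dividend, divisor):
--     dd = len(divisor) - 1
--     reg = dividend[:dd]
--     tail = divisor[1:]
--     for x in dividend[dd:]:
--         reg.append(x)
--         lead = reg.pop(0)
--         if lead:
--             reg = [r ^ c for r, c in zip(reg, tail)]
--     return reg
-- ===== Notes on version B (the rewrite author's own statement) =====
-- stated objective: alternative
-- what changed: B replaces A's in-place XOR mutation of the whole dividend array (indexed back into by an outer/inner index loop) with a single streaming pass that maintains only a divisor-degree-sized shift register: append the next coefficient, pop the leading one, and if it is nonzero XOR the divisor tail onto the register via zip.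
-- intended difference: When len(dividend) < len(divisor)-1 < 2*len(dividend), A's tail slice dividend[len(dividend)-degree:] has a negative start that wraps around and returns only the last degree-minus-n coefficients, while B returns the whole dividend, which is the intended remainder when dividing by a higher-degree polynomial. — e.g. on _polynomial_divide([1, 2], [5, 6, 7, 8]): A returns [2], B returns [1, 2]
import Mathlib
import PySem

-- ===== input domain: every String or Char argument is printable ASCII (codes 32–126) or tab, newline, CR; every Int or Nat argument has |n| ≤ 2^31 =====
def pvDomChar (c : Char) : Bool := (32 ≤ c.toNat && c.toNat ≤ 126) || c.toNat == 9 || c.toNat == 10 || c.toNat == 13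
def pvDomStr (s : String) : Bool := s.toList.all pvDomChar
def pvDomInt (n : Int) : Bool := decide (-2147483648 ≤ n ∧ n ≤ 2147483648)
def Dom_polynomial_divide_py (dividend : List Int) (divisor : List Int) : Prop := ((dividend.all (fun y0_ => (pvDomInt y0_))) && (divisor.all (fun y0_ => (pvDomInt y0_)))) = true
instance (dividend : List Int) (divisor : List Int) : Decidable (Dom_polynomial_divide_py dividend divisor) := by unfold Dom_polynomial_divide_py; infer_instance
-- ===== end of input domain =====

-- B replaces A's in-place XOR mutation of the whole dividend array with a single streaming pass
-- over a divisor-degree-sized shift register (alternative decomposition, same asymptotic cost);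
-- on dividend shorter than the divisor degree but longer than half of it, A's negative tail-slice
-- start wraps around (stated as D_ below) and B returns the whole dividend instead.


-- ===== PORT A =====
-- one iteration of A's outer loop: if dividend[i], XOR divisor[1:] onto positions i+1 .. i+degree
def aStep (divisor : List Int) (d : List Int) (i : Int) : List Int :=
  if PySem.List.pyGetD d i 0 ≠ 0 then
    (PySem.List.pyRange 1 (divisor.length : Int) 1).foldl
      (fun d2 j => PySem.List.pySetD d2 (i + j)
        (PySem.Int.bxor (PySem.List.pyGetD d2 (i + j) 0) (PySem.List.pyGetD divisor j 0))) d
  else d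

def polynomial_divide_py (dividend : List Int) (divisor : List Int) : List Int :=
  let dd : Int := (divisor.length : Int) - 1
  let final := (PySem.List.pyRange 0 ((dividend.length : Int) - dd) 1).foldl (aStep divisor) dividend
  PySem.List.slice final (some ((dividend.length : Int) - dd)) none

-- ===== PORT B =====
-- one step of B's streaming loop: shift x in, pop the lead, XOR the divisor tail on if lead ≠ 0
def bStep (tail : List Int) (reg : List Int) (x : Int) : List Int :=
  let reg1 := reg ++ [x]
  let lead := reg1.headD 0
  let reg2 := reg1.tail
  if lead ≠ 0 then (reg2.zip tail).map (fun q => PySem.Int.bxor q.1 q.2) else reg2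

def polynomial_divide_py_alt (dividend : List Int) (divisor : List Int) : List Int :=
  let dd : Int := (divisor.length : Int) - 1
  let tail := PySem.List.slice divisor (some 1) none
  (PySem.List.slice dividend (some dd) none).foldl (bStep tail)
    (PySem.List.slice dividend none (some dd))

-- ===== PRECONDITION & SPEC =====
-- Pre_ excludes only divisor = [], on which A raises IndexError (dividend[i] with i = len(dividend)).
def Pre_polynomial_divide_py (dividend : List Int) (divisor : List Int) : Prop := divisor ≠ []
instance (dividend : List Int) (divisor : List Int) : Decidable (Pre_polynomial_divide_py dividend divisor) := by unfold Pre_polynomial_divide_py; infer_instance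
def pvWitness_polynomial_divide_py : List Int × List Int := ([1, 0, 1, 1], [1, 1])

-- When len(dividend) < len(divisor)-1 < 2*len(dividend), A's tail slice dividend[len-degree:] has a
-- negative start that wraps around and returns only the last degree-len(dividend) coefficients,
-- while B returns the whole dividend — the intended remainder modulo a higher-degree polynomial.
def D_polynomial_divide_py (dividend : List Int) (divisor : List Int) : Prop :=
  dividend.length + 1 < divisor.length ∧ divisor.length < 2 * dividend.length + 1
instance (dividend : List Int) (divisor : List Int) : Decidable (D_polynomial_divide_py dividend divisor) := by unfold D_polynomial_divide_py; infer_instance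

def Spec_polynomial_divide_py (dividend : List Int) (divisor : List Int) (out : List Int) : Prop := ¬ D_polynomial_divide_py dividend divisor → out = polynomial_divide_py_alt dividend divisor
instance (dividend : List Int) (divisor : List Int) (out : List Int) : Decidable (Spec_polynomial_divide_py dividend divisor out) := by unfold Spec_polynomial_divide_py; infer_instance

def pvDiffWitness_polynomial_divide_py : List Int × List Int := ([1, 2], [5, 6, 7, 8])
def pvDiffWitnessOut_polynomial_divide_py : (List Int) × (List Int) := ([2], [1, 2])

-- ===== CLAIM (what is proved, stated in full; the proofs are below) =====
def Claim_unchanged_polynomial_divide_py : Prop := ∀ (dividend : List Int) (divisor : List Int), Dom_polynomial_divide_py dividend divisor → Pre_polynomial_divide_py dividend divisor → Spec_polynomial_divide_py dividend divisor (polynomial_divide_py dividend divisor)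
def Claim_changed_polynomial_divide_py : Prop := Dom_polynomial_divide_py (pvDiffWitness_polynomial_divide_py.1) (pvDiffWitness_polynomial_divide_py.2) ∧ Pre_polynomial_divide_py (pvDiffWitness_polynomial_divide_py.1) (pvDiffWitness_polynomial_divide_py.2) ∧ D_polynomial_divide_py (pvDiffWitness_polynomial_divide_py.1) (pvDiffWitness_polynomial_divide_py.2) ∧ polynomial_divide_py (pvDiffWitness_polynomial_divide_py.1) (pvDiffWitness_polynomial_divide_py.2) = pvDiffWitnessOut_polynomial_divide_py.1 ∧ polynomial_divide_py_alt (pvDiffWitness_polynomial_divide_py.1) (pvDiffWitness_polynomial_divide_py.2) = pvDiffWitnessOut_polynomial_divide_py.2 ∧ pvDiffWitnessOut_polynomial_divide_py.1 ≠ pvDiffWitnessOut_polynomial_divide_py.2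
def Claim_exact_polynomial_divide_py : Prop := ∀ (dividend : List Int) (divisor : List Int), Dom_polynomial_divide_py dividend divisor → Pre_polynomial_divide_py dividend divisor → D_polynomial_divide_py dividend divisor → polynomial_divide_py dividend divisor ≠ polynomial_divide_py_alt dividend divisor

-- ===== LEMMAS AND PROOFS =====

-- A's inner fold, written over Nat indices: sets positions p .. p+|tail|-1 to the zip-XOR
lemma setzip (tail : List Int) : ∀ (d : List Int) (p : Nat), p + tail.length ≤ d.length →
    (List.range tail.length).foldl
      (fun d2 t => d2.set (p + t) (PySem.Int.bxor (d2.getD (p + t) 0) (tail.getD t 0))) d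
    = d.take p ++ (((d.drop p).take tail.length).zip tail).map (fun q => PySem.Int.bxor q.1 q.2)
        ++ d.drop (p + tail.length) := by
  induction tail with
  | nil => intro d p h; simp
  | cons y ys ih =>
    intro d p h
    have hp : p < d.length := by simp at h; omega
    have hrange : List.range (y :: ys).length = 0 :: (List.range ys.length).map (·+1) := by
      simpa using List.range_succ_eq_map (n := ys.length)
    rw [hrange]
    simp only [List.foldl_cons, List.foldl_map]
    have hfun : (fun (d2 : List Int) (t : Nat) =>
        d2.set (p + (t+1)) (PySem.Int.bxor (d2.getD (p + (t+1)) 0) ((y :: ys).getD (t+1) 0)))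
        = fun d2 t => d2.set ((p+1) + t) (PySem.Int.bxor (d2.getD ((p+1) + t) 0) (ys.getD t 0)) := by
      funext d2 t
      have hn : p + (t+1) = (p+1) + t := by omega
      rw [hn]; rfl
    simp only [hfun]
    set v := PySem.Int.bxor (d.getD (p + 0) 0) ((y :: ys).getD 0 0) with hv
    rw [ih (d.set (p+0) v) (p+1) (by simp; simp at h; omega)]
    have hset : d.set (p+0) v = d.take p ++ v :: d.drop (p+1) := by
      simpa using List.set_eq_take_cons_drop v hp
    have hdropP : d.drop p = d[p] :: d.drop (p+1) := List.drop_eq_getElem_cons hp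
    rw [hset]
    have h1 : (d.take p ++ v :: d.drop (p+1)).take (p+1) = d.take p ++ [v] := by
      simp [List.take_append, List.length_take, Nat.min_eq_left hp.le]
    have h2 : (d.take p ++ v :: d.drop (p+1)).drop (p+1) = d.drop (p+1) := by
      simp [List.drop_append, List.length_take, Nat.min_eq_left hp.le]
    have h3 : (d.take p ++ v :: d.drop (p+1)).drop (p+1+ys.length) = d.drop (p+1+ys.length) := by
      rw [List.drop_append]
      have ha : (d.take p).drop (p+1+ys.length) = [] := by
        apply List.drop_eq_nil_of_le; simp [List.length_take]; omega
      have hb : p+1+ys.length - (d.take p).length = 1+ys.length := by simp [List.length_take]; omega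
      rw [ha, hb, show 1+ys.length = ys.length+1 from by omega, List.drop_succ_cons, List.drop_drop]
      simp
    rw [h1, h2, h3, hdropP]
    have hgd : d.getD (p+0) 0 = d[p] := by simp [List.getD, List.getElem?_eq_getElem hp]
    simp only [hv, hgd, List.getD_cons_zero, List.length_cons, List.take_succ_cons,
      List.zip_cons_cons, List.map_cons, List.nil_append, List.append_assoc, List.cons_append,
      show p + (ys.length+1) = p+1+ys.length from by omega]

-- aStep in explicit take/zip/drop form
lemma aStep_eq (c : Int) (tail : List Int) (d : List Int) (i : Nat)
    (h : i + tail.length < d.length) :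
    aStep (c :: tail) d (i : Int) =
      if d.getD i 0 ≠ 0 then
        d.take (i+1) ++ (((d.drop (i+1)).take tail.length).zip tail).map
          (fun q => PySem.Int.bxor q.1 q.2) ++ d.drop (i+1+tail.length)
      else d := by
  unfold aStep
  have hget : PySem.List.pyGetD d (i : Int) 0 = d.getD i 0 := by simp
  rw [hget]
  congr 1
  have hlen : ((c :: tail).length : Int) = (tail.length : Int) + 1 := by simp
  rw [hlen, PySem.List.pyRange_one]
  have htn : ((tail.length : Int) + 1 - 1).toNat = tail.length := by omega
  rw [htn, List.foldl_map]
  have hcong : (List.range tail.length).foldl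
      (fun (d2 : List Int) (t : Nat) => PySem.List.pySetD d2 ((i : Int) + (1 + (t : Int)))
        (PySem.Int.bxor (PySem.List.pyGetD d2 ((i : Int) + (1 + (t : Int))) 0)
          (PySem.List.pyGetD (c :: tail) (1 + (t : Int)) 0))) d
      = (List.range tail.length).foldl
      (fun d2 t => d2.set ((i+1) + t)
        (PySem.Int.bxor (d2.getD ((i+1) + t) 0) (tail.getD t 0))) d := by
    apply PySem.List.foldl_congr_mem
    intro acc t ht
    have h1 : (i : Int) + (1 + (t : Int)) = ((i + 1 + t : Nat) : Int) := by push_cast; ring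
    have h2 : (1 : Int) + (t : Int) = ((1 + t : Nat) : Int) := by push_cast; ring
    rw [h1, h2]
    simp only [PySem.List.pySetD_natCast, PySem.List.pyGetD_natCast]
    congr 1
    rw [show 1+t = t+1 from by omega, List.getD_cons_succ]
  rw [hcong, setzip tail d (i+1) (by omega)]

-- one B step on the current register and stream element, in explicit form
lemma bStep_val (tail : List Int) (d : List Int) (i : Nat)
    (h : i + tail.length < d.length) :
    bStep tail ((d.drop i).take tail.length) (d[i+tail.length]'h) =
      if d.getD i 0 ≠ 0 then
        (((d.drop (i+1)).take tail.length).zip tail).map (fun q => PySem.Int.bxor q.1 q.2)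
      else (d.drop (i+1)).take tail.length := by
  have hi : i < d.length := by omega
  have hk : tail.length < (d.drop i).length := by simp; omega
  have hx : d[i+tail.length]'h = (d.drop i)[tail.length]'hk := (List.getElem_drop ..).symm
  have hreg1 : (d.drop i).take tail.length ++ [d[i+tail.length]'h]
      = (d.drop i).take (tail.length+1) := by
    rw [hx]; exact (List.take_succ_eq_append_getElem hk).symm
  have hdi : d.drop i = d[i]'hi :: d.drop (i+1) := List.drop_eq_getElem_cons hi
  have hgd : d.getD i 0 = d[i]'hi := by simp [List.getD, List.getElem?_eq_getElem hi]
  simp only [bStep]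
  rw [hreg1, hdi, List.take_succ_cons]
  simp only [List.headD_cons, List.tail_cons, hgd]

-- loop correspondence: after processing indices i .. i+m-1, the suffix of A's array from i+m
-- equals B's register fold over the remaining stream
lemma loop_eq (c : Int) (tail : List Int) :
    ∀ (m : Nat) (d : List Int) (i : Nat), i + m + tail.length = d.length →
    ((PySem.List.pyRange (i : Int) ((i : Int) + (m : Int)) 1).foldl (aStep (c :: tail)) d).drop (i + m)
      = (d.drop (i + tail.length)).foldl (bStep tail) ((d.drop i).take tail.length) := by
  intro m
  induction m with
  | zero =>
    intro d i h
    rw [PySem.List.pyRange_one_eq_nil (by omega)]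
    have h1 : d.drop (i + tail.length) = [] := List.drop_eq_nil_of_le (by omega)
    rw [h1]
    simp only [List.foldl_nil, Nat.add_zero]
    rw [List.take_of_length_le (by simp; omega)]
  | succ m ih =>
    intro d i h
    have hlt : i + tail.length < d.length := by omega
    have hcons : PySem.List.pyRange (i : Int) ((i : Int) + ((m+1 : Nat) : Int)) 1
        = (i : Int) :: PySem.List.pyRange ((i : Int) + 1) ((i : Int) + ((m+1 : Nat) : Int)) 1 :=
      PySem.List.pyRange_one_cons (by push_cast; omega)
    rw [hcons, List.foldl_cons]
    have hstream : d.drop (i + tail.length) = (d[i+tail.length]'hlt) :: d.drop (i+tail.length+1) :=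
      List.drop_eq_getElem_cons hlt
    rw [hstream, List.foldl_cons, bStep_val tail d i hlt, aStep_eq c tail d i hlt]
    have hcast : (i : Int) + 1 = ((i+1 : Nat) : Int) := by push_cast; ring
    have hcast2 : (i : Int) + ((m+1 : Nat) : Int) = ((i+1 : Nat) : Int) + ((m : Nat) : Int) := by
      push_cast; ring
    by_cases hz : d.getD i 0 ≠ 0
    · simp only [if_pos hz]
      set Z := (((d.drop (i+1)).take tail.length).zip tail).map (fun q => PySem.Int.bxor q.1 q.2)
        with hZ
      set d1 := d.take (i+1) ++ Z ++ d.drop (i+1+tail.length) with hd1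
      have hlen_take : (d.take (i+1)).length = i+1 := by simp; omega
      have hlenZ : Z.length = tail.length := by
        rw [hZ]; simp [List.length_zip, List.length_take]; omega
      have hpre : ((d.take (i+1)) ++ Z).length = i+1+tail.length := by
        simp [hlen_take, hlenZ]
      have hdrop1 : d1.drop (i+1) = Z ++ d.drop (i+1+tail.length) := by
        rw [hd1, List.append_assoc, List.drop_append]
        simp [hlen_take]
      have hreg : (d1.drop (i+1)).take tail.length = Z := by
        rw [hdrop1]; exact List.take_left' hlenZ
      have hstream1 : d1.drop ((i+1) + tail.length) = d.drop (i+tail.length+1) := by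
        rw [hd1, List.drop_append, hpre]
        have hnil : ((d.take (i+1) ++ Z).drop (i+1+tail.length)) = [] :=
          List.drop_eq_nil_of_le (by rw [hpre])
        rw [hnil]
        simp only [List.nil_append, Nat.sub_self, List.drop_zero]
        congr 1; omega
      rw [hcast, hcast2, show i+(m+1) = (i+1)+m from by omega,
        ih d1 (i+1) (by rw [hd1]; simp [hlen_take, hlenZ]; omega), hstream1, hreg]
    · simp only [if_neg hz]
      have hIH := ih d (i+1) (by omega)
      rw [hcast, hcast2, show i + (m+1) = (i+1) + m from by omega,
        show i + tail.length + 1 = (i+1) + tail.length from by omega]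
      exact hIH

-- B's port unfolded on a cons divisor
lemma alt_eq (dividend : List Int) (c : Int) (tail : List Int) :
    polynomial_divide_py_alt dividend (c :: tail)
      = (dividend.drop tail.length).foldl (bStep tail) (dividend.take tail.length) := by
  simp only [polynomial_divide_py_alt]
  have hdd : ((c :: tail).length : Int) - 1 = ((tail.length : Nat) : Int) := by
    simp
  rw [hdd, PySem.List.slice_from_natCast, PySem.List.slice_to_natCast,
    PySem.List.slice_from_one, List.tail_cons]

-- ===== VERDICT (by name: the statement is the Claim_ definition above) =====
theorem polynomial_divide_py_spec : Claim_unchanged_polynomial_divide_py := by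
  intro dividend divisor _hdom hpre hnd
  obtain ⟨c, tail, rfl⟩ : ∃ c tail, divisor = c :: tail := by
    cases divisor with
    | nil => exact absurd rfl hpre
    | cons c t => exact ⟨c, t, rfl⟩
  show polynomial_divide_py dividend (c :: tail) = polynomial_divide_py_alt dividend (c :: tail)
  rw [alt_eq]
  simp only [polynomial_divide_py]
  have hdd : ((c :: tail).length : Int) - 1 = ((tail.length : Nat) : Int) := by simp
  rw [hdd]
  by_cases hk : tail.length ≤ dividend.length
  · have hsub : (dividend.length : Int) - (tail.length : Int)
        = ((dividend.length - tail.length : Nat) : Int) := by omega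
    rw [hsub, PySem.List.slice_from_natCast]
    have hloop := loop_eq c tail (dividend.length - tail.length) dividend 0 (by omega)
    simp only [Nat.cast_zero, zero_add, List.drop_zero] at hloop
    rw [hloop]
  · have h2n : ¬((dividend.length : Int) < (tail.length : Int)
        ∧ (tail.length : Int) < 2 * (dividend.length : Int)) := by
      intro hcon
      exact hnd ⟨by simp; omega, by simp; omega⟩
    have hge : 2 * dividend.length ≤ tail.length := by omega
    rw [PySem.List.pyRange_one_eq_nil (by omega)]
    simp only [List.foldl_nil]
    have hneg : (dividend.length : Int) - (tail.length : Int)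
        = -(((tail.length - dividend.length : Nat)) : Int) := by omega
    have hcl : PySem.List.clampIdx dividend.length
        (-(((tail.length - dividend.length : Nat)) : Int)) = 0 := by
      rw [PySem.List.clampIdx_neg_natCast _ _ (by omega)]; omega
    rw [hneg, PySem.List.slice_some_none, hcl, List.drop_zero]
    rw [List.drop_eq_nil_of_le (by omega), List.foldl_nil,
      List.take_of_length_le (by omega)]

theorem polynomial_divide_py_changed : Claim_changed_polynomial_divide_py := by
  unfold Claim_changed_polynomial_divide_py; decide

theorem polynomial_divide_py_tight : Claim_exact_polynomial_divide_py := by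
  intro dividend divisor _hdom hpre hD heq
  obtain ⟨c, tail, rfl⟩ : ∃ c tail, divisor = c :: tail := by
    cases divisor with
    | nil => exact absurd rfl hpre
    | cons c t => exact ⟨c, t, rfl⟩
  obtain ⟨hD1, hD2⟩ := hD
  have hn : dividend.length < tail.length := by simp at hD1; omega
  have h2n : tail.length < 2 * dividend.length := by simp at hD2; omega
  have hB : polynomial_divide_py_alt dividend (c :: tail) = dividend := by
    rw [alt_eq, List.drop_eq_nil_of_le (by omega), List.foldl_nil,
      List.take_of_length_le (by omega)]
  have hA : polynomial_divide_py dividend (c :: tail)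
      = dividend.drop (dividend.length - (tail.length - dividend.length)) := by
    simp only [polynomial_divide_py]
    have hdd : ((c :: tail).length : Int) - 1 = ((tail.length : Nat) : Int) := by simp
    rw [hdd, PySem.List.pyRange_one_eq_nil (by omega)]
    simp only [List.foldl_nil]
    have hneg : (dividend.length : Int) - (tail.length : Int)
        = -(((tail.length - dividend.length : Nat)) : Int) := by omega
    have hcl : PySem.List.clampIdx dividend.length
        (-(((tail.length - dividend.length : Nat)) : Int))
        = dividend.length - (tail.length - dividend.length) :=
      PySem.List.clampIdx_neg_natCast _ _ (by omega)
    rw [hneg, PySem.List.slice_some_none, hcl]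
  rw [hA, hB] at heq
  have hlen := congrArg List.length heq
  simp [List.length_drop] at hlen
  omega
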